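-- pv_equiv track=rewrite | github.com/nicocasaisd/cadalocalidadarg | collect_images.py | make_square_range
-- ===== SOURCE A (Python) =====
-- def make_square_range(x_tile_range, y_tile_range):
--     # prueba para hacer cuadrado el marco de la imagen
--     x_tile_len = (x_tile_range[1] - x_tile_range[0])
--     y_tile_len = (y_tile_range[1] - y_tile_range[0])
--     tile_diff = y_tile_len - x_tile_len
--     if( tile_diff > 0):
--         while(tile_diff != 0):
--             if(tile_diff % 2 == 0):
--                 x_tile_range[0] -= 1
--             else:
--                 x_tile_range[1] += 1
--
--             x_tile_len = (x_tile_range[1] - x_tile_range[0])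
--             y_tile_len = (y_tile_range[1] - y_tile_range[0])
--             tile_diff = y_tile_len - x_tile_len
--     elif(tile_diff < 0):
--         while(tile_diff != 0):
--             if(tile_diff % 2 == 0):
--                 y_tile_range[0] -= 1
--             else:
--                 y_tile_range[1] += 1
--
--             x_tile_len = (x_tile_range[1] - x_tile_range[0])
--             y_tile_len = (y_tile_range[1] - y_tile_range[0])
--             tile_diff = y_tile_len - x_tile_len
--
--     return x_tile_range, y_tile_range
-- ===== SOURCE B (Python) =====
-- def make_square_range(x_tile_range, y_tile_range):
--     # Closed form: extend the shorter axis by floor(d/2) at the low end and ceil(d/2) at the high end.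
--     d = (y_tile_range[1] - y_tile_range[0]) - (x_tile_range[1] - x_tile_range[0])
--     if d > 0:
--         x_tile_range[0] -= d // 2
--         x_tile_range[1] += (d + 1) // 2
--     elif d < 0:
--         y_tile_range[0] -= (-d) // 2
--         y_tile_range[1] += (1 - d) // 2
--     return x_tile_range, y_tile_range
-- ===== Notes on version B (the rewrite author's own statement) =====
-- stated objective: simpler
-- what changed: Replaced the decrement-by-one while loops with a closed form that adds floor(d/2) and ceil(d/2) to the shorter axis' endpoints.
import Mathlib
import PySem

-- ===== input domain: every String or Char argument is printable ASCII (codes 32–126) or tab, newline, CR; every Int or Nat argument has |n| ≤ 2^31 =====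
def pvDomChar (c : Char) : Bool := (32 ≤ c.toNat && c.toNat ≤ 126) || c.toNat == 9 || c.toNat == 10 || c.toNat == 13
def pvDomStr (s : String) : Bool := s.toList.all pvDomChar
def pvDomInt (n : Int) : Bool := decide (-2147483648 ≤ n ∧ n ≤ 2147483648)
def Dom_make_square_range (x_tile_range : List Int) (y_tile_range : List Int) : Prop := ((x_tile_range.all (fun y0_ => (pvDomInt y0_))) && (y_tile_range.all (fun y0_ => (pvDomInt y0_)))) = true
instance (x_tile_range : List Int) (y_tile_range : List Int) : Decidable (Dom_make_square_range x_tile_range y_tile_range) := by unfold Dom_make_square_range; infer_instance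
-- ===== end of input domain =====

-- B replaces A's decrement-by-one while loops by a closed-form update of the shorter axis;
-- both A and B mutate the argument lists in place in Python (identically); the theorems are about the return value.

-- ===== PORT A =====
-- A's first while loop: while tile_diff ≠ 0, pull x0 down (even diff) or push x1 up (odd diff).
-- The 'diff ≤ 0' stop is A's 'diff = 0' stop made total (only ever entered with diff > 0, where they coincide).
def aLoopX (x0 x1 y0 y1 : Int) : Int × Int :=
  let diff := (y1 - y0) - (x1 - x0)
  if diff ≤ 0 then (x0, x1)
  else if PySem.Int.mod diff 2 = 0 then aLoopX (x0 - 1) x1 y0 y1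
  else aLoopX x0 (x1 + 1) y0 y1
termination_by ((y1 - y0) - (x1 - x0)).toNat
decreasing_by all_goals (simp_all; omega)

-- A's second while loop: while tile_diff ≠ 0 (diff < 0), pull y0 down (even diff) or push y1 up (odd diff).
def aLoopY (x0 x1 y0 y1 : Int) : Int × Int :=
  let diff := (y1 - y0) - (x1 - x0)
  if 0 ≤ diff then (y0, y1)
  else if PySem.Int.mod diff 2 = 0 then aLoopY x0 x1 (y0 - 1) y1
  else aLoopY x0 x1 y0 (y1 + 1)
termination_by ((x1 - x0) - (y1 - y0)).toNat
decreasing_by all_goals (simp_all; omega)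

-- A reads and writes only indices 0 and 1 of each list; on lists shorter than 2 Python raises IndexError (outside Pre_).
def make_square_range (x_tile_range : List Int) (y_tile_range : List Int) : List Int × List Int :=
  match x_tile_range, y_tile_range with
  | x0 :: x1 :: xs, y0 :: y1 :: ys =>
    let tile_diff := (y1 - y0) - (x1 - x0)
    if tile_diff > 0 then
      let p := aLoopX x0 x1 y0 y1
      (p.1 :: p.2 :: xs, y0 :: y1 :: ys)
    else if tile_diff < 0 then
      let p := aLoopY x0 x1 y0 y1
      (x0 :: x1 :: xs, p.1 :: p.2 :: ys)
    else (x0 :: x1 :: xs, y0 :: y1 :: ys)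
  | _, _ => (x_tile_range, y_tile_range)   -- IndexError in Python; outside Pre_

-- ===== PORT B =====
-- Source B reads x[0], x[1], y[0], y[1] (pyGet?; none = IndexError, outside Pre_) and writes the two
-- endpoints of the shorter axis back; the untouched tail of each list is kept (drop 2).
def make_square_range_alt (x_tile_range : List Int) (y_tile_range : List Int) : List Int × List Int :=
  match PySem.List.pyGet? x_tile_range 0, PySem.List.pyGet? x_tile_range 1,
        PySem.List.pyGet? y_tile_range 0, PySem.List.pyGet? y_tile_range 1 with
  | some x0, some x1, some y0, some y1 =>
    let d := (y1 - y0) - (x1 - x0)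
    if d > 0 then
      ((x0 - PySem.Int.floordiv d 2) :: (x1 + PySem.Int.floordiv (d + 1) 2) :: x_tile_range.drop 2,
       y_tile_range)
    else if d < 0 then
      (x_tile_range,
       (y0 - PySem.Int.floordiv (-d) 2) :: (y1 + PySem.Int.floordiv (1 - d) 2) :: y_tile_range.drop 2)
    else (x_tile_range, y_tile_range)
  | _, _, _, _ => (x_tile_range, y_tile_range)  -- IndexError in Python; outside Pre_

-- ===== PRECONDITION & SPEC =====
-- A indexes both lists at 0 and 1, so it raises IndexError on any list of length < 2.
def Pre_make_square_range (x_tile_range : List Int) (y_tile_range : List Int) : Prop :=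
  2 ≤ x_tile_range.length ∧ 2 ≤ y_tile_range.length
instance (x_tile_range : List Int) (y_tile_range : List Int) : Decidable (Pre_make_square_range x_tile_range y_tile_range) := by unfold Pre_make_square_range; infer_instance
def pvWitness_make_square_range : List Int × List Int := ([3, 7], [10, 25])
def Spec_make_square_range (x_tile_range : List Int) (y_tile_range : List Int) (out : List Int × List Int) : Prop := out = make_square_range_alt x_tile_range y_tile_range
instance (x_tile_range : List Int) (y_tile_range : List Int) (out : List Int × List Int) : Decidable (Spec_make_square_range x_tile_range y_tile_range out) := by unfold Spec_make_square_range; infer_instance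

-- ===== CLAIM (what is proved, stated in full; the proofs are below) =====
def Claim_equal_make_square_range : Prop := ∀ (x_tile_range : List Int) (y_tile_range : List Int), Dom_make_square_range x_tile_range y_tile_range → Pre_make_square_range x_tile_range y_tile_range → Spec_make_square_range x_tile_range y_tile_range (make_square_range x_tile_range y_tile_range)

-- ===== LEMMAS AND PROOFS =====

theorem aLoopX_closed (x0 x1 y0 y1 : Int) (h : 0 ≤ (y1 - y0) - (x1 - x0)) :
    aLoopX x0 x1 y0 y1 =
      (x0 - PySem.Int.floordiv ((y1 - y0) - (x1 - x0)) 2,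
       x1 + PySem.Int.floordiv ((y1 - y0) - (x1 - x0) + 1) 2) := by
  set d := (y1 - y0) - (x1 - x0) with hd
  clear_value d
  -- proof irrelevant to x0 x1: induct on d.toNat
  induction hn : d.toNat generalizing d x0 x1 y0 y1 with
  | zero =>
    have hd0 : d = 0 := by omega
    rw [aLoopX]
    simp only [← hd, hd0]
    norm_num [PySem.Int.floordiv_eq_ediv_of_pos (a := (0:Int)) (by omega : (0:Int) < 2),
      PySem.Int.floordiv_eq_ediv_of_pos (a := (1:Int)) (by omega : (0:Int) < 2)]
  | succ n ih =>
    have hdpos : 0 < d := by omega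
    rw [aLoopX]
    simp only [← hd, if_neg (by omega : ¬ d ≤ 0)]
    rw [PySem.Int.mod_eq_emod_of_pos (by omega : (0:Int) < 2)]
    by_cases he : d % 2 = 0
    · rw [if_pos he]
      have h1 : (y1 - y0) - (x1 - (x0 - 1)) = d - 1 := by omega
      rw [ih (x0 - 1) x1 y0 y1 (d - 1) (by omega) h1.symm (by omega)]
      rw [PySem.Int.floordiv_eq_ediv_of_pos (a := d) (by omega : (0:Int) < 2),
          PySem.Int.floordiv_eq_ediv_of_pos (a := d - 1) (by omega : (0:Int) < 2),
          PySem.Int.floordiv_eq_ediv_of_pos (a := d + 1) (by omega : (0:Int) < 2),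
          PySem.Int.floordiv_eq_ediv_of_pos (a := d - 1 + 1) (by omega : (0:Int) < 2)]
      simp only [Prod.mk.injEq]; constructor <;> omega
    · rw [if_neg he]
      have h1 : (y1 - y0) - ((x1 + 1) - x0) = d - 1 := by omega
      rw [ih x0 (x1 + 1) y0 y1 (d - 1) (by omega) h1.symm (by omega)]
      rw [PySem.Int.floordiv_eq_ediv_of_pos (a := d) (by omega : (0:Int) < 2),
          PySem.Int.floordiv_eq_ediv_of_pos (a := d - 1) (by omega : (0:Int) < 2),
          PySem.Int.floordiv_eq_ediv_of_pos (a := d + 1) (by omega : (0:Int) < 2),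
          PySem.Int.floordiv_eq_ediv_of_pos (a := d - 1 + 1) (by omega : (0:Int) < 2)]
      simp only [Prod.mk.injEq]; constructor <;> omega

theorem aLoopY_closed (x0 x1 y0 y1 : Int) (h : (y1 - y0) - (x1 - x0) ≤ 0) :
    aLoopY x0 x1 y0 y1 =
      (y0 - PySem.Int.floordiv (-((y1 - y0) - (x1 - x0))) 2,
       y1 + PySem.Int.floordiv (1 - ((y1 - y0) - (x1 - x0))) 2) := by
  set d := (y1 - y0) - (x1 - x0) with hd
  clear_value d
  induction hn : (-d).toNat generalizing d x0 x1 y0 y1 with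
  | zero =>
    have hd0 : d = 0 := by omega
    rw [aLoopY]
    simp only [← hd, hd0]
    norm_num [PySem.Int.floordiv_eq_ediv_of_pos (a := (0:Int)) (by omega : (0:Int) < 2),
      PySem.Int.floordiv_eq_ediv_of_pos (a := (1:Int)) (by omega : (0:Int) < 2)]
  | succ n ih =>
    have hdneg : d < 0 := by omega
    rw [aLoopY]
    simp only [← hd, if_neg (by omega : ¬ 0 ≤ d)]
    rw [PySem.Int.mod_eq_emod_of_pos (by omega : (0:Int) < 2)]
    by_cases he : d % 2 = 0
    · rw [if_pos he]
      have h1 : (y1 - (y0 - 1)) - (x1 - x0) = d + 1 := by omega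
      rw [ih x0 x1 (y0 - 1) y1 (d + 1) (by omega) h1.symm (by omega)]
      rw [PySem.Int.floordiv_eq_ediv_of_pos (a := -d) (by omega : (0:Int) < 2),
          PySem.Int.floordiv_eq_ediv_of_pos (a := -(d + 1)) (by omega : (0:Int) < 2),
          PySem.Int.floordiv_eq_ediv_of_pos (a := 1 - d) (by omega : (0:Int) < 2),
          PySem.Int.floordiv_eq_ediv_of_pos (a := 1 - (d + 1)) (by omega : (0:Int) < 2)]
      simp only [Prod.mk.injEq]; constructor <;> omega
    · rw [if_neg he]
      have h1 : ((y1 + 1) - y0) - (x1 - x0) = d + 1 := by omega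
      rw [ih x0 x1 y0 (y1 + 1) (d + 1) (by omega) h1.symm (by omega)]
      rw [PySem.Int.floordiv_eq_ediv_of_pos (a := -d) (by omega : (0:Int) < 2),
          PySem.Int.floordiv_eq_ediv_of_pos (a := -(d + 1)) (by omega : (0:Int) < 2),
          PySem.Int.floordiv_eq_ediv_of_pos (a := 1 - d) (by omega : (0:Int) < 2),
          PySem.Int.floordiv_eq_ediv_of_pos (a := 1 - (d + 1)) (by omega : (0:Int) < 2)]
      simp only [Prod.mk.injEq]; constructor <;> omega

-- ===== VERDICT (by name: the statement is the Claim_ definition above) =====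
theorem make_square_range_spec : Claim_equal_make_square_range := by
  intro x y _ hpre
  match x, y with
  | x0 :: x1 :: xs, y0 :: y1 :: ys =>
    unfold Spec_make_square_range make_square_range make_square_range_alt
    rw [show PySem.List.pyGet? (x0 :: x1 :: xs) 0 = some x0 by
          simp [PySem.List.pyGet?, PySem.List.pyIdx?, show (0:Int) ≤ (xs.length:Int) + 1 by positivity],
        show PySem.List.pyGet? (x0 :: x1 :: xs) 1 = some x1 by
          simp [PySem.List.pyGet?, PySem.List.pyIdx?, show (0:Int) ≤ (xs.length:Int) by positivity],
        show PySem.List.pyGet? (y0 :: y1 :: ys) 0 = some y0 by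
          simp [PySem.List.pyGet?, PySem.List.pyIdx?, show (0:Int) ≤ (ys.length:Int) + 1 by positivity],
        show PySem.List.pyGet? (y0 :: y1 :: ys) 1 = some y1 by
          simp [PySem.List.pyGet?, PySem.List.pyIdx?, show (0:Int) ≤ (ys.length:Int) by positivity]]
    by_cases h1 : (y1 - y0) - (x1 - x0) > 0
    · simp only [if_pos h1, aLoopX_closed x0 x1 y0 y1 (by omega), List.drop_succ_cons, List.drop_zero]
    · by_cases h2 : (y1 - y0) - (x1 - x0) < 0
      · simp only [if_neg h1, if_pos h2, aLoopY_closed x0 x1 y0 y1 (by omega), List.drop_succ_cons, List.drop_zero]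
      · simp only [if_neg h1, if_neg h2]
  | [], _ => exact absurd hpre.1 (by simp)
  | [_], _ => exact absurd hpre.1 (by simp)
  | _ :: _ :: _, [] => exact absurd hpre.2 (by simp)
  | _ :: _ :: _, [_] => exact absurd hpre.2 (by simp)
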